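-- pv_equiv track=rewrite | github.com/AprilSun007/Leetcode | 311_sparse_matrix_multiplication.py | sparse_matrix_rep
-- ===== SOURCE A (Python) =====
-- def sparse_matrix_rep(A, axis = 0):
--     if A is None or len(A) == 0:
--         return None
--
--     a_dict = dict()
--     if axis == 0:
--         for i in range(len(A)):
--             for j in range(len(A[0])):
--                 #processA[i][j]
--
--                 if i not in a_dict:
--                     a_dict[i] = dict()
--
--                 if A[i][j] == 0:
--                     continue
--
--                 a_dict[i][j] = A[i][j]
--
--     if axis == 1:
--         for j in range(len(A[0])):
--             for i in range(len(A)):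
--                 #processA[i][j]
--
--                 if j not in a_dict:
--                     a_dict[j] = dict()
--
--                 if A[i][j] == 0:
--                     continue
--
--                 a_dict[j][i] = A[i][j]
--
--
--     return a_dict
-- ===== SOURCE B (Python) =====
-- def sparse_matrix_rep(A, axis=0):
--     """Nested-dict sparse representation: by rows (axis=0) or by columns (axis=1);
--     any other axis selects nothing."""
--     if A is None or len(A) == 0:
--         return None
--     if axis not in (0, 1):
--         return {}
--     rows, cols = len(A), len(A[0])
--     if axis == 1:
--         A = [[A[i][j] for i in range(rows)] for j in range(cols)]
--         rows, cols = cols, rows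
--     return {i: {j: A[i][j] for j in range(cols) if A[i][j]}
--             for i in range(rows)}
-- ===== Notes on version B (the rewrite author's own statement) =====
-- stated objective: simpler
-- what changed: Replaces A's two duplicated key-existence-checking nested dict-of-dict loops by one uniform nested comprehension over the matrix (explicitly transposed first when axis == 1), with the unsupported-axis and empty cases handled up front; Pre_ excludes ragged matrices with a row shorter than the first (A raises IndexError there) and width-0 matrices under axis 0, a corner no caller specifies where either value is defensible (A returns {} with no row keys, B gives each row index an empty dict).
-- outside the precondition, e.g. on sparse_matrix_rep([[]], 0): A returns {}, B returns {0: {}}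
import Mathlib
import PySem

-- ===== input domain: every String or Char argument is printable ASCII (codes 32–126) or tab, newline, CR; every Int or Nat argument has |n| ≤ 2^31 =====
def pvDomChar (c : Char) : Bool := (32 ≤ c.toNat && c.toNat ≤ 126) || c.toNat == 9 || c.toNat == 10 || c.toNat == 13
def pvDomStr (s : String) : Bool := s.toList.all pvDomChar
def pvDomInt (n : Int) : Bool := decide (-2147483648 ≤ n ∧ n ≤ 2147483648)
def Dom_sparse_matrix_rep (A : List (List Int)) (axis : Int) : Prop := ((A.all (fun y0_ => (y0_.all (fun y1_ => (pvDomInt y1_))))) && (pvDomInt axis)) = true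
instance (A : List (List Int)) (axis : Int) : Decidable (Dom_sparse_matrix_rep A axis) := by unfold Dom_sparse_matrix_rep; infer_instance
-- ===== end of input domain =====

-- B collapses A's two duplicated nested-loop branches into one uniform nested comprehension over
-- the matrix (explicitly transposed first when axis == 1); objective: simpler, same asymptotic cost.

-- ===== PORT A =====
-- Nested dict-of-dict loops, transliterated; out-of-range reads use default 0/[] (Python raises
-- IndexError there; those inputs are excluded by Pre_sparse_matrix_rep).
def sparse_matrix_rep (A : List (List Int)) (axis : Int) : Option (List (Int × List (Int × Int))) :=
  if A.length = 0 then none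
  else
    let d : PySem.Dict Int (PySem.Dict Int Int) := PySem.Dict.empty
    let d :=
      if axis = 0 then
        (List.range A.length).foldl (fun d (i : Nat) =>
          (List.range (A.headD []).length).foldl (fun d (j : Nat) =>
            let d := if (PySem.Dict.get? d (i : Int)).isNone then
                       PySem.Dict.insert d (i : Int) PySem.Dict.empty else d
            if (A.getD i []).getD j 0 = 0 then d
            else PySem.Dict.insert d (i : Int)
                   (PySem.Dict.insert (PySem.Dict.getD d (i : Int) PySem.Dict.empty)
                     (j : Int) ((A.getD i []).getD j 0))) d) d
      else d
    let d :=
      if axis = 1 then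
        (List.range (A.headD []).length).foldl (fun d (j : Nat) =>
          (List.range A.length).foldl (fun d (i : Nat) =>
            let d := if (PySem.Dict.get? d (j : Int)).isNone then
                       PySem.Dict.insert d (j : Int) PySem.Dict.empty else d
            if (A.getD i []).getD j 0 = 0 then d
            else PySem.Dict.insert d (j : Int)
                   (PySem.Dict.insert (PySem.Dict.getD d (j : Int) PySem.Dict.empty)
                     (i : Int) ((A.getD i []).getD j 0))) d) d
      else d
    some (d.items.map (fun p => (p.1, p.2.items)))

-- ===== PORT B =====
-- B returns the empty representation for any unsupported axis, otherwise optionally transposes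
-- by explicit indexing and emits the whole nested dict with one uniform comprehension;
-- in-range indexing A[i][j] is ported as getD (exact in range).
def sparse_matrix_rep_alt (A : List (List Int)) (axis : Int) : Option (List (Int × List (Int × Int))) :=
  if A.length = 0 then none
  else if axis ≠ 0 ∧ axis ≠ 1 then some []
  else
    let rows := A.length
    let cols := (A.headD []).length
    let M := if axis = 1 then
        (List.range cols).map (fun (j : Nat) =>
          (List.range rows).map (fun (i : Nat) => (A.getD i []).getD j 0))
      else A
    let rows' := if axis = 1 then cols else rows
    let cols' := if axis = 1 then rows else cols
    some ((List.range rows').map (fun (i : Nat) =>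
      ((i : Int), (List.range cols').filterMap (fun (j : Nat) =>
        if (M.getD i []).getD j 0 ≠ 0 then some ((j : Int), (M.getD i []).getD j 0) else none))))

-- ===== PRECONDITION & SPEC =====
-- Pre_ excludes: ragged matrices with a row shorter than the first under axis 0/1 (A raises
-- IndexError there); and width-0 matrices under axis 0, a corner no caller specifies where
-- either value is defensible (A returns {} with no row keys, B gives every row index an
-- empty dict).
def Pre_sparse_matrix_rep (A : List (List Int)) (axis : Int) : Prop :=
  ((axis = 0 ∨ axis = 1) → ∀ row ∈ A, (A.headD []).length ≤ row.length) ∧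
  (axis = 0 → A ≠ [] → (A.headD []).length ≠ 0)
instance (A : List (List Int)) (axis : Int) : Decidable (Pre_sparse_matrix_rep A axis) := by
  unfold Pre_sparse_matrix_rep; infer_instance

def pvWitness_sparse_matrix_rep : List (List Int) × Int := ([[1, 0], [0, 2]], 0)

def Spec_sparse_matrix_rep (A : List (List Int)) (axis : Int) (out : Option (List (Int × List (Int × Int)))) : Prop := out = sparse_matrix_rep_alt A axis
instance (A : List (List Int)) (axis : Int) (out : Option (List (Int × List (Int × Int)))) : Decidable (Spec_sparse_matrix_rep A axis out) := by unfold Spec_sparse_matrix_rep; infer_instance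

-- ===== CLAIM (what is proved, stated in full; the proofs are below) =====
def Claim_equal_sparse_matrix_rep : Prop := ∀ (A : List (List Int)) (axis : Int), Dom_sparse_matrix_rep A axis → Pre_sparse_matrix_rep A axis → Spec_sparse_matrix_rep A axis (sparse_matrix_rep A axis)

-- ===== LEMMAS AND PROOFS =====

-- Generic body of A's nested loop: outer key i, inner counter j, entry value g i j.
def pvIStep (g : Nat → Nat → Int) (i : Nat)
    (d : PySem.Dict Int (PySem.Dict Int Int)) (j : Nat) : PySem.Dict Int (PySem.Dict Int Int) :=
  let d := if (PySem.Dict.get? d (i : Int)).isNone then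
             PySem.Dict.insert d (i : Int) PySem.Dict.empty else d
  if g i j = 0 then d
  else PySem.Dict.insert d (i : Int)
         (PySem.Dict.insert (PySem.Dict.getD d (i : Int) PySem.Dict.empty) (j : Int) (g i j))

-- The nonzero entries of conceptual row i over the inner counters js.
def pvFRow (g : Nat → Nat → Int) (i : Nat) (js : List Nat) : List (Int × Int) :=
  js.filterMap (fun j => if g i j = 0 then none else some ((j : Int), g i j))

theorem pv_get?_mk_absent {ν : Type} (l : List (Int × ν)) (k : Int)
    (h : ∀ q ∈ l, q.1 ≠ k) : (PySem.Dict.mk l).get? k = none := by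
  have hf : List.find? (fun p => p.1 == k) l = none :=
    List.find?_eq_none.2 (fun q hq => by simpa using h q hq)
  simp [PySem.Dict.get?, hf]

theorem pv_get?_mk_append_last {ν : Type} (l : List (Int × ν)) (k : Int) (p : ν)
    (h : ∀ q ∈ l, q.1 ≠ k) : (PySem.Dict.mk (l ++ [(k, p)])).get? k = some p := by
  simp only [PySem.Dict.get?, List.find?_append]
  have h1 : l.find? (fun q => q.1 == k) = none := by
    rw [List.find?_eq_none]; intro q hq; simpa using h q hq
  simp [h1]

theorem pv_insert_mk_absent {ν : Type} (l : List (Int × ν)) (k : Int) (v : ν)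
    (h : ∀ q ∈ l, q.1 ≠ k) : (PySem.Dict.mk l).insert k v = PySem.Dict.mk (l ++ [(k, v)]) := by
  have hc : (PySem.Dict.mk l).contains k = false := by
    rw [PySem.Dict.contains_eq_isSome_get?, pv_get?_mk_absent l k h]; rfl
  apply PySem.Dict.ext
  rw [PySem.Dict.items_insert_of_not_contains _ _ hc]

theorem pv_insert_mk_append_last {ν : Type} (l : List (Int × ν)) (k : Int) (p v : ν)
    (h : ∀ q ∈ l, q.1 ≠ k) :
    (PySem.Dict.mk (l ++ [(k, p)])).insert k v = PySem.Dict.mk (l ++ [(k, v)]) := by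
  have hc : (PySem.Dict.mk (l ++ [(k, p)])).contains k = true := by
    rw [PySem.Dict.contains_eq_isSome_get?, pv_get?_mk_append_last l k p h]; rfl
  apply PySem.Dict.ext
  rw [PySem.Dict.items_insert_of_contains _ _ hc]
  show (l ++ [(k, p)]).map _ = _
  rw [List.map_append]
  congr 1
  · calc l.map (fun p => if (p.1 == k) = true then (k, v) else p)
        = l.map id := List.map_congr_left (fun q hq => by simp [h q hq])
      _ = l := List.map_id l
  · simp

theorem pv_inner_ext (g : Nat → Nat → Int) (i : Nat) (js : List Nat) :
    ∀ (l : List (Int × PySem.Dict Int Int)) (p : List (Int × Int)),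
    (∀ q ∈ l, q.1 ≠ (i : Int)) → (∀ q ∈ p, ∀ j ∈ js, q.1 ≠ (j : Int)) → js.Nodup →
    js.foldl (pvIStep g i) (PySem.Dict.mk (l ++ [((i : Int), PySem.Dict.mk p)]))
      = PySem.Dict.mk (l ++ [((i : Int), PySem.Dict.mk (p ++ pvFRow g i js))]) := by
  induction js with
  | nil => intro l p _ _ _; simp [pvFRow]
  | cons j rest ih =>
    intro l p hl hp nd
    have hget : (PySem.Dict.mk (l ++ [((i : Int), PySem.Dict.mk p)])).get? (i : Int)
        = some (PySem.Dict.mk p) := pv_get?_mk_append_last l _ _ hl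
    rw [List.foldl_cons]
    have hstep : pvIStep g i (PySem.Dict.mk (l ++ [((i : Int), PySem.Dict.mk p)])) j
        = if g i j = 0 then PySem.Dict.mk (l ++ [((i : Int), PySem.Dict.mk p)])
          else PySem.Dict.mk (l ++ [((i : Int), PySem.Dict.mk (p ++ [((j : Int), g i j)]))]) := by
      unfold pvIStep
      rw [hget]
      simp only [Option.isNone_some, Bool.false_eq_true, if_false]
      by_cases h0 : g i j = 0
      · simp [h0]
      · rw [if_neg h0, if_neg h0, PySem.Dict.getD_eq_get?_getD, hget]
        have hpj : (PySem.Dict.mk p).insert (j : Int) (g i j) = PySem.Dict.mk (p ++ [((j : Int), g i j)]) :=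
          pv_insert_mk_absent p _ _ (fun q hq => hp q hq j (by simp))
        rw [Option.getD_some, hpj, pv_insert_mk_append_last l _ _ _ hl]
    by_cases h0 : g i j = 0
    · rw [hstep, if_pos h0, ih l p hl (fun q hq j' hj' => hp q hq j' (by simp [hj'])) nd.of_cons]
      have : pvFRow g i (j :: rest) = pvFRow g i rest := by simp [pvFRow, h0]
      rw [this]
    · rw [hstep, if_neg h0]
      have hfr : ∀ q ∈ p ++ [((j : Int), g i j)], ∀ j' ∈ rest, q.1 ≠ (j' : Int) := by
        intro q hq j' hj'
        rcases List.mem_append.1 hq with h | h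
        · exact hp q h j' (by simp [hj'])
        · simp only [List.mem_singleton] at h
          subst h
          have : j ≠ j' := fun he => (List.nodup_cons.1 nd).1 (he ▸ hj')
          simpa using fun hc => this (Nat.cast_injective hc)
      rw [ih l _ hl hfr nd.of_cons]
      have : pvFRow g i (j :: rest) = ((j : Int), g i j) :: pvFRow g i rest := by
        simp [pvFRow, h0]
      rw [this, List.append_assoc]
      rfl

theorem pv_inner_start (g : Nat → Nat → Int) (i : Nat) (js : List Nat)
    (l : List (Int × PySem.Dict Int Int))
    (hl : ∀ q ∈ l, q.1 ≠ (i : Int)) (hne : js ≠ []) (nd : js.Nodup) :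
    js.foldl (pvIStep g i) (PySem.Dict.mk l)
      = PySem.Dict.mk (l ++ [((i : Int), PySem.Dict.mk (pvFRow g i js))]) := by
  cases js with
  | nil => exact absurd rfl hne
  | cons j rest =>
    rw [List.foldl_cons]
    have hget : (PySem.Dict.mk l).get? (i : Int) = none := pv_get?_mk_absent l _ hl
    have hins : (PySem.Dict.mk l).insert (i : Int) PySem.Dict.empty
        = PySem.Dict.mk (l ++ [((i : Int), PySem.Dict.mk [])]) := pv_insert_mk_absent l _ _ hl
    have hstep : pvIStep g i (PySem.Dict.mk l) j
        = if g i j = 0 then PySem.Dict.mk (l ++ [((i : Int), PySem.Dict.mk [])])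
          else PySem.Dict.mk (l ++ [((i : Int), PySem.Dict.mk [((j : Int), g i j)])]) := by
      unfold pvIStep
      rw [hget]
      simp only [Option.isNone_none, if_true]
      rw [hins]
      by_cases h0 : g i j = 0
      · simp [h0]
      · rw [if_neg h0, if_neg h0, PySem.Dict.getD_eq_get?_getD,
            pv_get?_mk_append_last l _ _ hl, Option.getD_some]
        have hpj : (PySem.Dict.mk ([] : List (Int × Int))).insert (j : Int) (g i j)
            = PySem.Dict.mk [((j : Int), g i j)] := pv_insert_mk_absent [] _ _ (by simp)
        rw [hpj, pv_insert_mk_append_last l _ _ _ hl]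
    by_cases h0 : g i j = 0
    · rw [hstep, if_pos h0,
          pv_inner_ext g i rest l [] hl (by simp) nd.of_cons]
      have : pvFRow g i (j :: rest) = pvFRow g i rest := by simp [pvFRow, h0]
      rw [this]; rfl
    · rw [hstep, if_neg h0]
      have hfr : ∀ q ∈ [((j : Int), g i j)], ∀ j' ∈ rest, q.1 ≠ (j' : Int) := by
        intro q hq j' hj'
        simp only [List.mem_singleton] at hq
        subst hq
        have : j ≠ j' := fun he => (List.nodup_cons.1 nd).1 (he ▸ hj')
        simpa using fun hc => this (Nat.cast_injective hc)
      rw [pv_inner_ext g i rest l _ hl hfr nd.of_cons]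
      have : pvFRow g i (j :: rest) = ((j : Int), g i j) :: pvFRow g i rest := by
        simp [pvFRow, h0]
      rw [this]
      rfl

theorem pv_outer (g : Nat → Nat → Int) (c : Nat) (hc : c ≠ 0) (r : Nat) :
    (List.range r).foldl (fun d i => (List.range c).foldl (pvIStep g i) d) PySem.Dict.empty
      = PySem.Dict.mk ((List.range r).map (fun (i : Nat) =>
          ((i : Int), PySem.Dict.mk (pvFRow g i (List.range c))))) := by
  induction r with
  | zero => rfl
  | succ r ih =>
    rw [List.range_succ, List.foldl_append, ih, List.foldl_cons, List.foldl_nil]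
    have hl : ∀ q ∈ (List.range r).map (fun (i : Nat) =>
        ((i : Int), PySem.Dict.mk (pvFRow g i (List.range c)))), q.1 ≠ (r : Int) := by
      intro q hq
      simp only [List.mem_map, List.mem_range] at hq
      obtain ⟨i, hi, rfl⟩ := hq
      simpa using Nat.ne_of_lt hi
    rw [pv_inner_start g r (List.range c) _ hl
        (by simpa [List.range_eq_nil] using hc) List.nodup_range]
    rw [List.map_append]
    rfl

-- B's entry filter equals A's (the conditions are negations of each other).
theorem pv_row_eq (g : Nat → Nat → Int) (i : Nat) (js : List Nat) :
    js.filterMap (fun j => if g i j ≠ 0 then some ((j : Int), g i j) else none)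
      = pvFRow g i js := by
  unfold pvFRow
  apply List.filterMap_congr
  intro j _
  by_cases h : g i j = 0 <;> simp [h]

-- Evaluation lemmas for A's port at axis 0 and 1 (rfl modulo the outer guard).
theorem pv_portA_axis0 (A : List (List Int)) (hA : A.length ≠ 0) :
    sparse_matrix_rep A 0
      = some (((List.range A.length).foldl (fun d i =>
          (List.range (A.headD []).length).foldl
            (pvIStep (fun i j => (A.getD i []).getD j 0) i) d)
          PySem.Dict.empty).items.map (fun p => (p.1, p.2.items))) := by
  unfold sparse_matrix_rep
  rw [if_neg hA]
  rfl

theorem pv_portA_axis1 (A : List (List Int)) (hA : A.length ≠ 0) :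
    sparse_matrix_rep A 1
      = some (((List.range (A.headD []).length).foldl (fun d j =>
          (List.range A.length).foldl
            (pvIStep (fun j i => (A.getD i []).getD j 0) j) d)
          PySem.Dict.empty).items.map (fun p => (p.1, p.2.items))) := by
  unfold sparse_matrix_rep
  rw [if_neg hA]
  rfl

-- The common core: A's fold over access function g equals B's comprehension shape.
theorem pv_core (g : Nat → Nat → Int) (r c : Nat) (hc : c ≠ 0) :
    ((List.range r).foldl (fun d i => (List.range c).foldl (pvIStep g i) d)
        PySem.Dict.empty).items.map (fun p => (p.1, p.2.items))
      = (List.range r).map (fun (i : Nat) =>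
          ((i : Int), (List.range c).filterMap (fun (j : Nat) =>
            if g i j ≠ 0 then some ((j : Int), g i j) else none))) := by
  rw [pv_outer g c hc r]
  show ((List.range r).map _).map _ = _
  rw [List.map_map]
  apply List.map_congr_left
  intro i _
  show ((i : Int), pvFRow g i (List.range c)) = _
  rw [← pv_row_eq g i (List.range c)]

-- ===== VERDICT (by name: the statement is the Claim_ definition above) =====
theorem sparse_matrix_rep_spec : Claim_equal_sparse_matrix_rep := by
  intro A axis _ hpre
  obtain ⟨hrag, hc0⟩ := hpre
  unfold Spec_sparse_matrix_rep
  by_cases hA : A.length = 0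
  · unfold sparse_matrix_rep sparse_matrix_rep_alt
    rw [if_pos hA, if_pos hA]
  · by_cases h0 : axis = 0
    · subst h0
      have hc : (A.headD []).length ≠ 0 :=
        hc0 rfl (fun he => hA (by simp [he]))
      rw [pv_portA_axis0 A hA,
        pv_core (fun i j => (A.getD i []).getD j 0) A.length (A.headD []).length hc]
      unfold sparse_matrix_rep_alt
      simp only [if_neg hA]
      norm_num
    · by_cases h1 : axis = 1
      · subst h1
        rw [pv_portA_axis1 A hA,
          pv_core (fun j i => (A.getD i []).getD j 0) (A.headD []).length A.length hA]
        unfold sparse_matrix_rep_alt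
        simp only [if_neg hA]
        norm_num
        intro j hj
        rw [List.getElem?_range hj]
        apply List.filterMap_congr
        intro i hi
        have hi' := List.mem_range.1 hi
        simp [hi']
      · unfold sparse_matrix_rep sparse_matrix_rep_alt
        rw [if_neg hA, if_neg hA, if_pos ⟨h0, h1⟩]
        simp only [if_neg h0, if_neg h1]
        rfl
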